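-- pv_equiv track=rewrite | github.com/lkforward/poem_writer | rnn_utils.py | seq_with_next_char
-- ===== SOURCE A (Python) =====
-- def seq_with_next_char(str_list, seq_length):
--     """
--     Make the string list into (sequence, next_char) pair for training.
--
--     [INPUTS]:
--     str_list: a list.
--         Each element is a string (a sonnet for the poems) from the data file.
--     seq_length: integer.
--         The length of the resultant sequence.
--     [OUTPUTS]:
--     seqs: a list.
--         Each element is string with the fixed length "seq_length".
--     next_char: a list.
--         The next char for the corresponding string.
--     """
--     seqs = []
--     next_char = []
--
--     for sonnet in str_list:
--         for i in range(len(sonnet)-seq_length):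
--             seqs.append(sonnet[i : i + seq_length])
--             next_char.append(sonnet[i + seq_length])
--
--     return seqs, next_char
-- ===== SOURCE B (Python) =====
-- def seq_with_next_char(str_list, seq_length):
--     if seq_length < 0:
--         raise ValueError("seq_length must be non-negative")
--     seqs = []
--     next_char = []
--     for sonnet in str_list:
--         if len(sonnet) <= seq_length:
--             continue  # too short: no full window plus next char
--         for tup in zip(*(sonnet[k:] for k in range(seq_length + 1))):
--             seqs.append(''.join(tup[:seq_length]))
--             next_char.append(tup[seq_length])
--     return seqs, next_char
-- ===== Notes on version B (the rewrite author's own statement) =====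
-- stated objective: alternative
-- what changed: Replaces integer-index slicing over range(len-seq_length) with a zip of seq_length+1 shifted views of each sonnet, joining each tuple's first seq_length characters and taking its last as the next char; B validates seq_length and raises ValueError when it is negative.
-- outside the precondition, e.g. on seq_with_next_char(['ab'], -1): A returns (['a', '', ''], ['b', 'a', 'b']), B raises ValueError; on seq_with_next_char([], -5): A returns ([], []), B raises ValueError
import Mathlib
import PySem

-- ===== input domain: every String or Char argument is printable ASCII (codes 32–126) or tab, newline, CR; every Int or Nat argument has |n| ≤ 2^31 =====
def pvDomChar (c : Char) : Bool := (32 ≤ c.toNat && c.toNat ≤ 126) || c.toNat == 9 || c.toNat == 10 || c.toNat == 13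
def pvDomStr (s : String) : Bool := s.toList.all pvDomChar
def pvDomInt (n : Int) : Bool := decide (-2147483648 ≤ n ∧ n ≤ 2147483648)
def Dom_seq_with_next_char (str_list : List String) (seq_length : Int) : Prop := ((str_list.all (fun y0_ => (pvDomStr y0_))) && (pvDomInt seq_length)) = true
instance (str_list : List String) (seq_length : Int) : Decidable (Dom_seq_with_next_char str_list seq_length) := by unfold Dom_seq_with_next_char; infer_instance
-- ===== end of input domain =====

-- B rebuilds each (sequence, next_char) pair from a zip of seq_length+1 shifted views of the
-- sonnet instead of A's integer-index slicing ("alternative", same cost); B also validates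
-- seq_length, raising ValueError when it is negative (outside Pre_).

-- ===== PORT A =====
-- literal port of A: for each sonnet, for i in range(len(sonnet)-seq_length),
-- append sonnet[i:i+seq_length] and sonnet[i+seq_length].  pyGet? is none exactly where
-- Python raises IndexError (outside Pre_); the .getD [] default is never reached under Pre_.
def seq_with_next_char (str_list : List String) (seq_length : Int) : List String × List String :=
  str_list.foldl
    (fun acc sonnet =>
      (PySem.List.pyRange 0 (PySem.Str.len sonnet - seq_length) 1).foldl
        (fun acc i =>
          (acc.1 ++ [PySem.Str.slice sonnet (some i) (some (i + seq_length))],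
           acc.2 ++ [String.ofList
             (((PySem.Str.pyGet? sonnet (i + seq_length)).map (fun c => [c])).getD [])]))
        acc)
    ([], [])

-- ===== PORT B =====
-- zip(*iters) over lists of chars: empty for no iterables, else truncate at the shortest.
-- The fuel (length of the first list) only bounds the recursion; it is reached exactly when
-- some list runs empty, so the result never depends on it.
def pvZipAllF : Nat → List (List Char) → List (List Char)
  | _, [] => []
  | fuel, a :: rest =>
    if (a :: rest).any List.isEmpty then []
    else
      match fuel with
      | 0 => []
      | fuel + 1 => ((a :: rest).map (fun l => l.headD ' ')) :: pvZipAllF fuel ((a :: rest).map List.tail)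

def pvZipAll (ls : List (List Char)) : List (List Char) := pvZipAllF (ls.headD []).length ls

-- literal port of B: the 'raise ValueError' branch for negative seq_length has no return
-- value (those inputs are outside Pre_); it is ported as ([], []).  Otherwise, skip sonnets
-- with len <= seq_length ('continue'); else for tup in zip(*(sonnet[k:] for k in
-- range(seq_length+1))), append ''.join(tup[:seq_length]) and tup[seq_length]
-- (pyGet?'s default is unreachable: each tup has seq_length+1 elements).
def seq_with_next_char_alt (str_list : List String) (seq_length : Int) : List String × List String :=
  if seq_length < 0 then ([], [])  -- Python B raises ValueError here
  else
    str_list.foldl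
      (fun acc sonnet =>
        if PySem.Str.len sonnet ≤ seq_length then acc
        else
          (pvZipAll ((PySem.List.pyRange 0 (seq_length + 1) 1).map
              (fun k => (PySem.Str.slice sonnet (some k) none).toList))).foldl
            (fun acc tup =>
              (acc.1 ++ [String.ofList (PySem.List.slice tup none (some seq_length))],
               acc.2 ++ [String.ofList (((PySem.List.pyGet? tup seq_length).map (fun c => [c])).getD [])]))
            acc)
      ([], [])

-- ===== PRECONDITION & SPEC =====
-- Pre_ excludes all negative seq_length: a window of negative length is meaningless — there A
-- either raises IndexError (some sonnet shorter than -seq_length) or returns accidental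
-- negative-index wraparound pairs, and B raises ValueError; Pre_ also marks exactly where
-- both programs return.
def Pre_seq_with_next_char (str_list : List String) (seq_length : Int) : Prop :=
  0 ≤ seq_length
instance (str_list : List String) (seq_length : Int) : Decidable (Pre_seq_with_next_char str_list seq_length) := by unfold Pre_seq_with_next_char; infer_instance
def pvWitness_seq_with_next_char : List String × Int := (["abcd", "xy"], 2)

def Spec_seq_with_next_char (str_list : List String) (seq_length : Int) (out : List String × List String) : Prop := out = seq_with_next_char_alt str_list seq_length
instance (str_list : List String) (seq_length : Int) (out : List String × List String) : Decidable (Spec_seq_with_next_char str_list seq_length out) := by unfold Spec_seq_with_next_char; infer_instance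

-- ===== CLAIM (what is proved, stated in full; the proofs are below) =====
def Claim_equal_seq_with_next_char : Prop := ∀ (str_list : List String) (seq_length : Int), Dom_seq_with_next_char str_list seq_length → Pre_seq_with_next_char str_list seq_length → Spec_seq_with_next_char str_list seq_length (seq_with_next_char str_list seq_length)

-- ===== LEMMAS AND PROOFS =====

-- per-sonnet pair lists produced by A's inner loop
def pvFA (s : String) (n : Int) : List String :=
  (PySem.List.pyRange 0 (PySem.Str.len s - n) 1).map
    (fun i => PySem.Str.slice s (some i) (some (i + n)))
def pvGA (s : String) (n : Int) : List String :=
  (PySem.List.pyRange 0 (PySem.Str.len s - n) 1).map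
    (fun i => String.ofList (((PySem.Str.pyGet? s (i + n)).map (fun c => [c])).getD []))

-- per-sonnet tuple list produced by B's zip
def pvWin (s : String) (n : Int) : List (List Char) :=
  pvZipAll ((PySem.List.pyRange 0 (n + 1) 1).map
    (fun k => (PySem.Str.slice s (some k) none).toList))
def pvFB (s : String) (n : Int) : List String :=
  (pvWin s n).map (fun tup => String.ofList (PySem.List.slice tup none (some n)))
def pvGB (s : String) (n : Int) : List String :=
  (pvWin s n).map (fun tup => String.ofList (((PySem.List.pyGet? tup n).map (fun c => [c])).getD []))
-- guarded per-sonnet lists (B skips sonnets with len <= n)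
def pvFB2 (s : String) (n : Int) : List String := if PySem.Str.len s ≤ n then [] else pvFB s n
def pvGB2 (s : String) (n : Int) : List String := if PySem.Str.len s ≤ n then [] else pvGB s n

theorem pvA_eq (str_list : List String) (n : Int) :
    seq_with_next_char str_list n = (str_list.flatMap (pvFA · n), str_list.flatMap (pvGA · n)) := by
  unfold seq_with_next_char
  induction str_list using List.reverseRecOn with
  | nil => rfl
  | append_singleton xs s ih =>
      rw [List.foldl_append, ih, List.foldl_cons, List.foldl_nil,
          PySem.List.foldl_prod_mk
            (fun l i => l ++ [PySem.Str.slice s (some i) (some (i + n))])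
            (fun l i => l ++ [String.ofList ((Option.map (fun c => [c]) (PySem.Str.pyGet? s (i + n))).getD [])]),
          PySem.List.foldl_append_singleton_eq_map,
          PySem.List.foldl_append_singleton_eq_map]
      simp [pvFA, pvGA]

theorem pvB_eq (str_list : List String) (n : Int) (hn : ¬ n < 0) :
    seq_with_next_char_alt str_list n = (str_list.flatMap (pvFB2 · n), str_list.flatMap (pvGB2 · n)) := by
  unfold seq_with_next_char_alt
  rw [if_neg hn]
  induction str_list using List.reverseRecOn with
  | nil => rfl
  | append_singleton xs s ih =>
      rw [List.foldl_append, ih, List.foldl_cons, List.foldl_nil]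
      by_cases hg : PySem.Str.len s ≤ n
      · rw [if_pos hg]
        have h1 : pvFB2 s n = [] := by rw [pvFB2, if_pos hg]
        have h2 : pvGB2 s n = [] := by rw [pvGB2, if_pos hg]
        simp [h1, h2]
      · rw [if_neg hg,
            PySem.List.foldl_prod_mk
              (fun l tup => l ++ [String.ofList (PySem.List.slice tup none (some n))])
              (fun l tup => l ++ [String.ofList ((Option.map (fun c => [c]) (PySem.List.pyGet? tup n)).getD [])]),
            PySem.List.foldl_append_singleton_eq_map,
            PySem.List.foldl_append_singleton_eq_map]
        have h1 : pvFB2 s n = pvFB s n := by rw [pvFB2, if_neg hg]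
        have h2 : pvGB2 s n = pvGB s n := by rw [pvGB2, if_neg hg]
        simp [h1, h2, pvFB, pvGB, pvWin]

-- the m+1 shifted views of u, in cons form
theorem pvViewsCons (m : Nat) (u : List Char) :
    (List.range (m + 1)).map (fun k => u.drop k) = u :: (List.range m).map (fun k => u.tail.drop k) := by
  rw [List.range_succ_eq_map, List.map_cons, List.map_map, List.drop_zero]
  congr 1
  apply List.map_congr_left
  intro k _
  simp only [Function.comp_apply]
  rw [← List.drop_one, List.drop_drop, Nat.add_comm]

-- one-step unfolding of pvZipAll (the fuel bookkeeping is invisible)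
theorem pvZipAll_cons (a : List Char) (rest : List (List Char)) :
    pvZipAll (a :: rest) = if (a :: rest).any List.isEmpty then []
      else ((a :: rest).map (fun l => l.headD ' ')) :: pvZipAll ((a :: rest).map List.tail) := by
  by_cases h : (a :: rest).any List.isEmpty = true
  · simp only [pvZipAll, h, if_true]
    cases a <;> simp [pvZipAllF, h]
  · have ha : a ≠ [] := by
      intro hnil
      exact h (by simp [hnil])
    obtain ⟨c, a', rfl⟩ : ∃ c a', a = c :: a' := by
      cases a with
      | nil => exact absurd rfl ha
      | cons c a' => exact ⟨c, a', rfl⟩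
    simp only [pvZipAll, List.headD_cons, List.length_cons, pvZipAllF]
    rw [if_neg h, if_neg h]
    rfl

-- the zip of the m+1 shifted views of s is exactly the list of windows of length m+1
theorem pvZipAll_views (m : Nat) (s : List Char) :
    pvZipAll ((List.range (m + 1)).map (fun k => s.drop k)) =
      (List.range (s.length - m)).map (fun i => (s.drop i).take (m + 1)) := by
  induction s with
  | nil =>
      rw [pvViewsCons m []]
      simp [pvZipAll, pvZipAllF]
  | cons c t ih =>
      rw [pvViewsCons m (c :: t)]
      simp only [List.tail_cons]
      rw [pvZipAll_cons]
      by_cases h : m ≤ t.length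
      · have hne : ((c :: t) :: (List.range m).map (fun k => t.drop k)).any List.isEmpty = false := by
          simp only [List.any_eq_false]
          intro l hl
          rcases List.mem_cons.1 hl with rfl | h2
          · simp
          · obtain ⟨k, hk, rfl⟩ := List.mem_map.1 h2
            have := List.mem_range.1 hk
            simp only [List.isEmpty_iff, ← List.length_eq_zero_iff, List.length_drop]
            omega
        rw [hne]
        simp only [Bool.false_eq_true, if_false]
        simp only [List.map_cons, List.headD_cons, List.tail_cons, List.map_map]
        have harg : (List.range m).map (List.tail ∘ fun k => t.drop k) =
            (List.range m).map (fun k => t.tail.drop k) := by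
          apply List.map_congr_left
          intro k _
          simp only [Function.comp_apply]
          rw [List.tail_drop, ← List.drop_one, List.drop_drop, Nat.add_comm]
        rw [harg, ← pvViewsCons m t, ih]
        have hheads : (List.range m).map ((fun l => l.headD ' ') ∘ fun k => t.drop k) = t.take m := by
          apply List.ext_getElem
          · simp
            omega
          · intro j h1 h2
            simp only [List.length_map, List.length_range] at h1
            simp only [List.getElem_map, List.getElem_range, Function.comp_apply,
              List.getElem_take]
            rw [List.headD_eq_head?_getD, List.head?_drop,
              List.getElem?_eq_getElem (by omega)]
            rfl
        rw [hheads]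
        have hlen : (c :: t).length - m = (t.length - m) + 1 := by
          simp only [List.length_cons]
          omega
        rw [hlen, List.range_succ_eq_map, List.map_cons, List.map_map]
        refine congrArg₂ List.cons ?_ ?_
        · simp [List.take_succ_cons]
        · apply List.map_congr_left
          intro i _
          simp only [Function.comp_apply]
          rw [show i.succ = i + 1 from rfl, List.drop_succ_cons]
      · have hne : ((c :: t) :: (List.range m).map (fun k => t.drop k)).any List.isEmpty = true := by
          simp only [List.any_eq_true]
          refine ⟨t.drop (m - 1), List.mem_cons_of_mem _ (List.mem_map.2 ⟨m - 1, List.mem_range.2 (by omega), rfl⟩), ?_⟩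
          simp only [List.isEmpty_iff, ← List.length_eq_zero_iff, List.length_drop]
          omega
        rw [hne]
        simp only [if_true]
        rw [show (c :: t).length - m = 0 by simp only [List.length_cons]; omega]
        rfl

-- A's index range, cast to a Nat range (empty on both sides when the sonnet is too short)
theorem pvRange_cast (L m : Nat) :
    PySem.List.pyRange 0 ((L : Int) - (m : Int)) 1 = (List.range (L - m)).map (fun k : Nat => (k : Int)) := by
  by_cases h : m ≤ L
  · rw [show (L : Int) - (m : Int) = ((L - m : Nat) : Int) by omega]
    exact PySem.List.pyRange_zero_natCast (L - m)
  · have h1 : (List.range (L - m)).map (fun k : Nat => (k : Int)) = [] := by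
      rw [show L - m = 0 by omega]; rfl
    rw [h1]
    apply List.eq_nil_iff_forall_not_mem.2
    intro i hi
    have := PySem.List.mem_pyRange_one.1 hi
    omega

-- per-sonnet equality of the sequence lists
theorem pvF_eq (s : String) (m : Nat) : pvFA s (m : Int) = pvFB s (m : Int) := by
  unfold pvFA pvFB pvWin
  rw [show ((m : Int) + 1) = ((m + 1 : Nat) : Int) by push_cast; ring,
      PySem.List.pyRange_zero_natCast (m + 1), List.map_map]
  have hviews : (List.range (m + 1)).map ((fun k : Int => (PySem.Str.slice s (some k) none).toList) ∘ (fun k : Nat => (k : Int)))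
      = (List.range (m + 1)).map (fun k : Nat => s.toList.drop k) := by
    apply List.map_congr_left
    intro k _
    simp [Function.comp, PySem.Str.slice]
  rw [hviews, pvZipAll_views m, List.map_map, PySem.Str.len_eq, pvRange_cast s.toList.length m,
      List.map_map]
  apply List.map_congr_left
  intro i hi
  simp only [List.mem_range] at hi
  simp only [Function.comp]
  have hslice : PySem.Str.slice s (some (i : Int)) (some ((i : Int) + (m : Int)))
      = String.ofList ((s.toList.drop i).take m) := by
    simp [PySem.Str.slice, PySem.List.slice_natCast_add, PySem.Chars.slice]
  rw [hslice]
  congr 1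
  rw [show PySem.List.slice ((s.toList.drop i).take (m + 1)) none (some (m : Int))
        = (((s.toList.drop i).take (m + 1)).take m) from PySem.List.slice_to_natCast _ m]
  rw [List.take_take]
  congr 1
  omega

-- per-sonnet equality of the next-char lists
theorem pvG_eq (s : String) (m : Nat) : pvGA s (m : Int) = pvGB s (m : Int) := by
  unfold pvGA pvGB pvWin
  rw [show ((m : Int) + 1) = ((m + 1 : Nat) : Int) by push_cast; ring,
      PySem.List.pyRange_zero_natCast (m + 1), List.map_map]
  have hviews : (List.range (m + 1)).map ((fun k : Int => (PySem.Str.slice s (some k) none).toList) ∘ (fun k : Nat => (k : Int)))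
      = (List.range (m + 1)).map (fun k : Nat => s.toList.drop k) := by
    apply List.map_congr_left
    intro k _
    simp [Function.comp, PySem.Str.slice]
  rw [hviews, pvZipAll_views m, List.map_map, PySem.Str.len_eq, pvRange_cast s.toList.length m,
      List.map_map]
  apply List.map_congr_left
  intro i hi
  simp only [List.mem_range] at hi
  simp only [Function.comp]
  have hlen : ((s.toList.drop i).take (m + 1)).length = m + 1 := by
    simp only [List.length_take, List.length_drop]
    omega
  have hA : PySem.Str.pyGet? s ((i : Int) + (m : Int)) = s.toList[i + m]? := by
    exact_mod_cast PySem.Str.pyGet?_natCast s (i + m)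
  have hB : PySem.List.pyGet? ((s.toList.drop i).take (m + 1)) (m : Int)
      = ((s.toList.drop i).take (m + 1))[m]? := PySem.List.pyGet?_natCast _ m
  rw [hA, hB]
  simp [List.getElem?_drop, Nat.add_comm]

-- when the sonnet is too short A's index range is empty, so both per-sonnet lists are []
theorem pvRange_nonpos (b : Int) (hb : b ≤ 0) : PySem.List.pyRange 0 b 1 = [] := by
  apply List.eq_nil_iff_forall_not_mem.2
  intro i hi
  have := PySem.List.mem_pyRange_one.1 hi
  omega

theorem pvA_short (s : String) (n : Int) (h : PySem.Str.len s ≤ n) :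
    pvFA s n = [] ∧ pvGA s n = [] := by
  unfold pvFA pvGA
  rw [pvRange_nonpos _ (by omega), List.map_nil, List.map_nil]
  exact ⟨rfl, rfl⟩

theorem pvF_eq2 (s : String) (m : Nat) : pvFA s (m : Int) = pvFB2 s (m : Int) := by
  unfold pvFB2
  by_cases h : PySem.Str.len s ≤ (m : Int)
  · rw [if_pos h, (pvA_short s m h).1]
  · rw [if_neg h]; exact pvF_eq s m

theorem pvG_eq2 (s : String) (m : Nat) : pvGA s (m : Int) = pvGB2 s (m : Int) := by
  unfold pvGB2
  by_cases h : PySem.Str.len s ≤ (m : Int)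
  · rw [if_pos h, (pvA_short s m h).2]
  · rw [if_neg h]; exact pvG_eq s m

-- ===== VERDICT (by name: the statement is the Claim_ definition above) =====
theorem seq_with_next_char_spec : Claim_equal_seq_with_next_char := by
  intro str_list n _hdom hpre
  have h0 : (0 : Int) ≤ n := hpre
  obtain ⟨m, rfl⟩ : ∃ m : Nat, n = (m : Int) := ⟨n.toNat, (Int.toNat_of_nonneg h0).symm⟩
  show seq_with_next_char str_list (m : Int) = seq_with_next_char_alt str_list (m : Int)
  rw [pvA_eq, pvB_eq _ _ (by omega)]
  refine Prod.ext ?_ ?_ <;> simp only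
  · exact congrArg (fun g => List.flatMap g str_list) (funext fun s => pvF_eq2 s m)
  · exact congrArg (fun g => List.flatMap g str_list) (funext fun s => pvG_eq2 s m)
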